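-- pv_equiv track=rewrite | github.com/carlosfieldsierra/Algorithm-Practice | GreedyAlgorthims/Seats/Attempt.py | solve
-- ===== SOURCE A (Python) =====
-- def solve(A):
--     cost = 0
--     diff = 0
--     firstSeatIndex = getFirstSeatIndex(A)
--     for i in range(firstSeatIndex+1,len(A)):
--         if A[i] == 'x':
--             cost += diff
--             diff = 0
--         else:
--             diff +=1
--
--     return cost
--
-- def getFirstSeatIndex(A):
--     for i in range(len(A)):
--         if A[i] == 'x':
--             return i
-- ===== SOURCE B (Python) =====
-- def solve(A):
--     xs = [i for i, c in enumerate(A) if c == 'x']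
--     return xs[-1] - xs[0] - (len(xs) - 1)
-- ===== Notes on version B (the rewrite author's own statement) =====
-- stated objective: simpler
-- what changed: Replaces the first-seat scan plus gap-accumulating loop by one enumerate pass collecting seat positions and a closed-form answer last - first - (count - 1).
import Mathlib
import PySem

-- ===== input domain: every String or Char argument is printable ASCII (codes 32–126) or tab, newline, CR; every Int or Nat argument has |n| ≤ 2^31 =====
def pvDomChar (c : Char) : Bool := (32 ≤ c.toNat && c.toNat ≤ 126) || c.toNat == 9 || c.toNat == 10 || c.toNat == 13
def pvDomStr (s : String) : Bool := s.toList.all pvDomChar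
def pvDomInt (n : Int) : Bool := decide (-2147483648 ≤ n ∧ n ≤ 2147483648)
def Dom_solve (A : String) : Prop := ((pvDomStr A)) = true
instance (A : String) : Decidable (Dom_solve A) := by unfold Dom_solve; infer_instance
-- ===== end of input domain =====

-- B replaces the first-seat scan plus gap-accumulating loop by one enumerate pass collecting
-- seat positions and the closed form last - first - (count - 1) (objective: simpler).

-- ===== PORT A =====
-- helper getFirstSeatIndex: 'for i in range(len(A)): if A[i] == "x": return i' (early return → recursion over the range list)
def gfsGo (L : List Char) : List Int → Option Int
  | [] => none
  | i :: rest => if PySem.List.pyGetD L i ' ' == 'x' then some i else gfsGo L rest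

def getFirstSeatIndex (A : String) : Option Int :=
  gfsGo A.toList (PySem.List.pyRange 0 (PySem.Str.len A) 1)

def solve (A : String) : Int :=
  match getFirstSeatIndex A with
  | none => 0   -- Python raises TypeError here (None + 1); excluded by Pre_solve
  | some f =>
    ((PySem.List.pyRange (f + 1) (PySem.Str.len A) 1).foldl
      (fun (st : Int × Int) i =>
        if PySem.List.pyGetD A.toList i ' ' == 'x' then (st.1 + st.2, 0) else (st.1, st.2 + 1))
      (0, 0)).1

-- ===== PORT B =====
def solve_alt (A : String) : Int :=
  let xs := ((PySem.List.enumerate A.toList 0).filter (fun p => p.2 == 'x')).map (fun p => p.1)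
  PySem.List.pyGetD xs (-1) 0 - PySem.List.pyGetD xs 0 0 - ((xs.length : Int) - 1)

-- ===== PRECONDITION & SPEC =====
-- Pre_ excludes only strings with no 'x': there A raises TypeError (None + 1) and B raises IndexError (xs[-1] on []).
def Pre_solve (A : String) : Prop := 'x' ∈ A.toList
instance (A : String) : Decidable (Pre_solve A) := by unfold Pre_solve; infer_instance
def pvWitness_solve : String := "x.x"

def Spec_solve (A : String) (out : Int) : Prop := out = solve_alt A
instance (A : String) (out : Int) : Decidable (Spec_solve A out) := by unfold Spec_solve; infer_instance

-- ===== CLAIM (what is proved, stated in full; the proofs are below) =====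
def Claim_equal_solve : Prop := ∀ (A : String), Dom_solve A → Pre_solve A → Spec_solve A (solve A)

-- ===== LEMMAS AND PROOFS =====

-- positions (with offset a) of the seats 'x' in a char list: the common spec both ports reach
def posList : List Char → Int → List Int
  | [], _ => []
  | c :: t, a => if c = 'x' then a :: posList t (a + 1) else posList t (a + 1)

theorem posList_eq_nil_iff (l : List Char) (a : Int) : posList l a = [] ↔ 'x' ∉ l := by
  induction l generalizing a with
  | nil => simp [posList]
  | cons c t ih =>
    by_cases h : c = 'x' <;> simp [posList, h, ih]; tauto

theorem b_positions (l : List Char) (s : Int) :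
    ((PySem.List.enumerate l s).filter (fun p => p.2 == 'x')).map (fun p => p.1) = posList l s := by
  induction l generalizing s with
  | nil => simp [PySem.List.enumerate, posList]
  | cons c t ih =>
    by_cases h : c = 'x' <;>
      simp [PySem.List.enumerate, posList, h, ih]

theorem fold_closed (l : List Char) (a c d : Int) :
    ((l.foldl (fun (st : Int × Int) ch =>
        if ch == 'x' then (st.1 + st.2, 0) else (st.1, st.2 + 1)) (c, d)).1)
    = c + ((posList l a).getLast?.elim 0
            (fun m => d + m - a - (((posList l a).length : Int) - 1))) := by
  induction l generalizing a c d with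
  | nil => simp [posList]
  | cons ch t ih =>
    rw [List.foldl_cons]
    by_cases h : ch = 'x'
    · subst h
      have hacc : (if (('x' : Char) == 'x') = true then ((c, d).1 + (c, d).2, 0)
          else ((c, d).1, (c, d).2 + 1)) = (c + d, 0) := by simp
      rw [hacc, ih (a + 1) (c + d) 0]
      have hcons : posList ('x' :: t) a = a :: posList t (a + 1) := by simp [posList]
      rw [hcons]
      rcases hq : posList t (a + 1) with _ | ⟨m0, q⟩
      · simp
      · rw [List.getLast?_cons_cons]
        obtain ⟨m, hm⟩ : ∃ m, (m0 :: q).getLast? = some m :=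
          ⟨_, List.getLast?_eq_some_getLast (by simp)⟩
        rw [hm]
        simp only [Option.elim_some, List.length_cons]
        push_cast
        omega
    · have hacc : (if (ch == 'x') = true then ((c, d).1 + (c, d).2, 0)
          else ((c, d).1, (c, d).2 + 1)) = (c, d + 1) := by simp [h]
      rw [hacc, ih (a + 1) c (d + 1)]
      have hcons : posList (ch :: t) a = posList t (a + 1) := by simp [posList, h]
      rw [hcons]
      rcases hq : (posList t (a + 1)).getLast? with _ | m
      · simp
      · simp only [Option.elim_some]
        omega

theorem gfs_spec (L : List Char) (n : Nat) : ∀ (i : Nat), L.length - i ≤ n →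
    gfsGo L (PySem.List.pyRange (i : Int) ((L.length : Int)) 1) = (posList (L.drop i) i).head? := by
  induction n with
  | zero =>
    intro i hi
    have hle : L.length ≤ i := by omega
    rw [PySem.List.pyRange_one_eq_nil (by exact_mod_cast hle), List.drop_eq_nil_of_le hle]
    simp [gfsGo, posList]
  | succ n ih =>
    intro i hi
    by_cases h : i < L.length
    · rw [PySem.List.pyRange_one_cons (by exact_mod_cast h)]
      rw [List.drop_eq_getElem_cons h]
      simp only [gfsGo]
      rw [PySem.List.pyGetD_natCast, List.getD_eq_getElem _ _ h]
      by_cases hx : L[i] = 'x'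
      · simp [hx, posList]
      · rw [if_neg (by simp [hx])]
        have hc : ((i : Int) + 1) = (((i + 1 : Nat)) : Int) := by push_cast; ring
        rw [hc, ih (i + 1) (by omega)]
        have hpl : posList (L[i] :: L.drop (i + 1)) (i : Int) =
            posList (L.drop (i + 1)) ((i : Int) + 1) := by
          simp only [posList, if_neg hx]
        rw [hpl, hc]
    · have hle : L.length ≤ i := by omega
      rw [PySem.List.pyRange_one_eq_nil (by exact_mod_cast hle), List.drop_eq_nil_of_le hle]
      simp [gfsGo, posList]

theorem posList_tail (L : List Char) (n : Nat) : ∀ (i : Nat), L.length - i ≤ n →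
    ∀ p rest, posList (L.drop i) i = p :: rest →
    ∃ j : Nat, p = (j : Int) ∧ j < L.length ∧ posList (L.drop (j + 1)) ((j : Int) + 1) = rest := by
  induction n with
  | zero =>
    intro i hi p rest hp
    have hle : L.length ≤ i := by omega
    rw [List.drop_eq_nil_of_le hle] at hp
    simp [posList] at hp
  | succ n ih =>
    intro i hi p rest hp
    by_cases h : i < L.length
    · rw [List.drop_eq_getElem_cons h] at hp
      by_cases hx : L[i] = 'x'
      · simp only [posList, hx, if_true] at hp
        obtain ⟨hp1, hp2⟩ := List.cons.inj hp
        refine ⟨i, hp1.symm, h, ?_⟩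
        have hc : ((i : Int) + 1) = (((i + 1 : Nat)) : Int) := by push_cast; ring
        rw [← hp2, hc]
      · simp only [posList, hx, if_false] at hp
        have hc : ((i : Int) + 1) = (((i + 1 : Nat)) : Int) := by push_cast; ring
        rw [hc] at hp
        exact ih (i + 1) (by omega) p rest hp
    · have hle : L.length ≤ i := by omega
      rw [List.drop_eq_nil_of_le hle] at hp
      simp [posList] at hp

-- ===== VERDICT (by name: the statement is the Claim_ definition above) =====
theorem solve_spec : Claim_equal_solve := by
  intro A _ hpre
  unfold Spec_solve solve_alt
  rw [b_positions]
  have hne : posList A.toList 0 ≠ [] := by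
    rw [Ne, posList_eq_nil_iff]; simpa using hpre
  rcases hps : posList A.toList 0 with _ | ⟨p, rest⟩
  · exact absurd hps hne
  · obtain ⟨j, hpj, hjlt, hrest⟩ :=
      posList_tail A.toList A.toList.length 0 (by omega) p rest
        (by simpa using hps)
    have hp0 : 0 ≤ p := by omega
    have hgfs : getFirstSeatIndex A = some p := by
      unfold getFirstSeatIndex
      rw [PySem.Str.len_eq]
      have hg := gfs_spec A.toList A.toList.length 0 (by omega)
      simp only [Nat.cast_zero, List.drop_zero] at hg
      rw [hg, hps, List.head?_cons]
    have hsolve : solve A =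
        ((PySem.List.pyRange (p + 1) (PySem.Str.len A) 1).foldl
          (fun (st : Int × Int) i =>
            if PySem.List.pyGetD A.toList i ' ' == 'x' then (st.1 + st.2, 0) else (st.1, st.2 + 1))
          (0, 0)).1 := by
      unfold solve
      rw [hgfs]
    rw [hsolve, PySem.Str.len_eq,
      PySem.List.foldl_pyRange_pyGetD' A.toList ' '
        (fun (st : Int × Int) ch => if ch == 'x' then (st.1 + st.2, 0) else (st.1, st.2 + 1))
        (0, 0) (by omega)]
    have htn : (p + 1).toNat = j + 1 := by omega
    rw [htn, fold_closed (A.toList.drop (j + 1)) ((j : Int) + 1) 0 0, hrest]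
    -- B side
    show _ = PySem.List.pyGetD (p :: rest) (-1) 0 - PySem.List.pyGetD (p :: rest) 0 0 -
      (((p :: rest).length : Int) - 1)
    rcases hr : rest with _ | ⟨m0, q⟩
    · subst hr
      rw [PySem.List.pyGetD_neg_one _ _ (by simp), PySem.List.pyGetD_zero_cons]
      simp [List.getLast]
    · subst hr
      rw [PySem.List.pyGetD_neg_one _ _ (by simp), PySem.List.pyGetD_zero_cons]
      have hlast : (p :: m0 :: q).getLast (by simp) = (m0 :: q).getLast (by simp) :=
        List.getLast_cons (by simp)
      have hm : (m0 :: q).getLast? = some ((m0 :: q).getLast (by simp)) :=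
        List.getLast?_eq_some_getLast (by simp)
      rw [hlast, hm]
      simp only [Option.elim_some, List.length_cons]
      push_cast
      omega
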